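-- pv_equiv track=rewrite | github.com/ajoudaki/CITER | dag_creator.py | _skip_balanced_optional_brackets
-- ===== SOURCE A (Python) =====
-- def _skip_balanced_optional_brackets(s: str, i: int) -> int:
--     if i >= len(s) or s[i] != "[":
--         return i
--     depth = 0
--     j = i
--     while j < len(s):
--         ch = s[j]
--         if ch == "\\" and j + 1 < len(s):
--             j += 2
--             continue
--         if ch == "[":
--             depth += 1
--         elif ch == "]":
--             depth -= 1
--             if depth == 0:
--                 return j + 1
--         j += 1
--     return i
-- ===== SOURCE B (Python) =====
-- def _skip_group(s, pos):
--     # assumes s[pos] == '['; scan from pos+1 for the matching ']'.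
--     # returns the index just past it, or None if the group is unbalanced.
--     n = len(s)
--     j = pos + 1
--     while j < n:
--         ch = s[j]
--         if ch == "\\" and j + 1 < n:
--             j += 2
--         elif ch == "[":
--             r = _skip_group(s, j)
--             if r is None:
--                 return None
--             j = r
--         elif ch == "]":
--             return j + 1
--         else:
--             j += 1
--     return None
--
--
-- def _skip_balanced_optional_brackets(s: str, i: int) -> int:
--     if i >= len(s) or s[i] != "[":
--         return i
--     r = _skip_group(s, i)
--     return i if r is None else r
-- ===== Notes on version B (the rewrite author's own statement) =====
-- stated objective: alternative
-- what changed: Replaces the flat while-loop with an explicit depth counter by recursive descent over the nested bracket structure: a helper skips one group and recurses on nested '[', signalling unbalance with None.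
import Mathlib
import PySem

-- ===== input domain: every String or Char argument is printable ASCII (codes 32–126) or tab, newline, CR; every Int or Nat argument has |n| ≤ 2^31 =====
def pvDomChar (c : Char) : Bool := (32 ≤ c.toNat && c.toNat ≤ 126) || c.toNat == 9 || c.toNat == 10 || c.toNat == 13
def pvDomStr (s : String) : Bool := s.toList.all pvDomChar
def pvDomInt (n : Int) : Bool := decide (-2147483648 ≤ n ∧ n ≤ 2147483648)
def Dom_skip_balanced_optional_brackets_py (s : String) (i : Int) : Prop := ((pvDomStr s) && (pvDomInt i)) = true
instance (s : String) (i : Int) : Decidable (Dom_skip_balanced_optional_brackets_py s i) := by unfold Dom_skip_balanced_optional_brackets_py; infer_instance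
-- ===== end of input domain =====

-- B re-implements the depth-counter scan as recursive descent over the nested bracket structure
-- (objective: alternative decomposition, same cost). Both agree wherever Python A returns.

-- ===== PORT A =====
-- the flat while-loop of A: j scans, depth counts open brackets; returns i if it runs off the end
def pvLoopA (s : String) (i : Int) (j : Int) (depth : Int) : Int :=
  if _h : j < PySem.Str.len s then
    match PySem.Str.pyGet? s j with
    | none => i  -- Python would raise here (j < -len); unreachable inside Pre_
    | some ch =>
      if ch = '\\' ∧ j + 1 < PySem.Str.len s then pvLoopA s i (j + 2) depth
      else if ch = '[' then pvLoopA s i (j + 1) (depth + 1)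
      else if ch = ']' then
        if depth - 1 = 0 then j + 1 else pvLoopA s i (j + 1) (depth - 1)
      else pvLoopA s i (j + 1) depth
  else i
termination_by (PySem.Str.len s - j).toNat
decreasing_by all_goals omega

def skip_balanced_optional_brackets_py (s : String) (i : Int) : Int :=
  if i ≥ PySem.Str.len s then i
  else match PySem.Str.pyGet? s i with
    | none => i  -- Python raises IndexError here; outside Pre_
    | some c => if c ≠ '[' then i else pvLoopA s i i 0

-- ===== PORT B =====
-- recursive-descent helper of B: scans from j (= pos+1 of _skip_group) for the ']' closing the
-- current group, recursing on nested '['; fuel makes the recursion structural (always sufficient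
-- at the call site below, since every recursive call strictly increases j, bounded by len s).
def pvGroupB (s : String) (fuel : Nat) (j : Int) : Option Int :=
  match fuel with
  | 0 => none
  | f + 1 =>
    if j < PySem.Str.len s then
      match PySem.Str.pyGet? s j with
      | none => none
      | some ch =>
        if ch = '\\' ∧ j + 1 < PySem.Str.len s then pvGroupB s f (j + 2)
        else if ch = '[' then
          match pvGroupB s f (j + 1) with
          | none => none
          | some r => pvGroupB s f r
        else if ch = ']' then some (j + 1)
        else pvGroupB s f (j + 1)
    else none

def skip_balanced_optional_brackets_py_alt (s : String) (i : Int) : Int :=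
  if i ≥ PySem.Str.len s then i
  else match PySem.Str.pyGet? s i with
    | none => i
    | some c =>
      if c ≠ '[' then i
      else match pvGroupB s (PySem.Str.len s - i).toNat (i + 1) with
        | none => i
        | some r => r

-- ===== PRECONDITION & SPEC =====
-- Pre_ excludes exactly the inputs where Python A raises IndexError (i < -len(s)); A returns everywhere else.
def Pre_skip_balanced_optional_brackets_py (s : String) (i : Int) : Prop :=
  -(PySem.Str.len s) ≤ i
instance (s : String) (i : Int) : Decidable (Pre_skip_balanced_optional_brackets_py s i) := by unfold Pre_skip_balanced_optional_brackets_py; infer_instance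

def pvWitness_skip_balanced_optional_brackets_py : String × Int := ("[a\\]b]", 0)

def Spec_skip_balanced_optional_brackets_py (s : String) (i : Int) (out : Int) : Prop := out = skip_balanced_optional_brackets_py_alt s i
instance (s : String) (i : Int) (out : Int) : Decidable (Spec_skip_balanced_optional_brackets_py s i out) := by unfold Spec_skip_balanced_optional_brackets_py; infer_instance

-- ===== CLAIM (what is proved, stated in full; the proofs are below) =====
def Claim_equal_skip_balanced_optional_brackets_py : Prop := ∀ (s : String) (i : Int), Dom_skip_balanced_optional_brackets_py s i → Pre_skip_balanced_optional_brackets_py s i → Spec_skip_balanced_optional_brackets_py s i (skip_balanced_optional_brackets_py s i)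

-- ===== LEMMAS AND PROOFS =====

-- successful pvGroupB lands strictly past j and within the string
theorem pvGroupB_bounds (s : String) (fuel : Nat) (j r : Int)
    (h : pvGroupB s fuel j = some r) : j < r ∧ r ≤ (s.length : Int) := by
  induction fuel generalizing j r with
  | zero => simp [pvGroupB] at h
  | succ f ih =>
    rw [pvGroupB] at h
    simp only [PySem.Str.len_eq, PySem.Str.pyGet?, PySem.Chars.pyGet?, String.length_toList] at h
    split at h
    · cases hg : PySem.List.pyGet? s.toList j with
      | none => simp [hg] at h
      | some ch =>
        simp only [hg] at h
        split_ifs at h with h1 h2 h3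
        · have := ih _ _ h; omega
        · cases hrec : pvGroupB s f (j + 1) with
          | none => simp [hrec] at h
          | some r1 =>
            simp only [hrec] at h
            have b1 := ih _ _ hrec
            have b2 := ih _ _ h
            omega
        · cases h; omega
        · have := ih _ _ h; omega
    · exact absurd h (by simp)

-- the bridge: A's flat scan at depth d >= 1 equals B's descent for the current group,
-- continued at depth d-1 on success when d > 1
theorem pvBridge (s : String) (i : Int) (fuel : Nat) :
    ∀ (j d : Int), -(s.length : Int) ≤ j → 1 ≤ d →
      ((s.length : Int) - j).toNat < fuel →
      pvLoopA s i j d =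
        (match pvGroupB s fuel j with
         | none => i
         | some r => if d = 1 then r else pvLoopA s i r (d - 1)) := by
  induction fuel with
  | zero => intro j d _ _ hf; omega
  | succ f ih =>
    intro j d hj hd hf
    rw [pvLoopA, pvGroupB]
    simp only [PySem.Str.len_eq, PySem.Str.pyGet?, PySem.Chars.pyGet?, String.length_toList]
    by_cases hlt : j < (s.length : Int)
    · simp only [hlt, dif_pos, if_pos]
      cases hg : PySem.List.pyGet? s.toList j with
      | none => simp [hg]
      | some ch =>
        simp only [hg]
        by_cases h1 : ch = '\\' ∧ j + 1 < (s.length : Int)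
        · simp only [h1]
          exact ih (j + 2) d (by omega) hd (by omega)
        · simp only [h1, if_false]
          by_cases h2 : ch = '['
          · simp only [h2, if_pos]
            have hrec := ih (j + 1) (d + 1) (by omega) (by omega) (by omega)
            cases hnest : pvGroupB s f (j + 1) with
            | none => simp only [hnest] at hrec ⊢; simpa using hrec
            | some r =>
              simp only [hnest] at hrec ⊢
              have hb := pvGroupB_bounds s f (j + 1) r hnest
              have hne1 : ¬ (d + 1 = 1) := by omega
              rw [hrec, if_neg hne1]
              have hdd : d + 1 - 1 = d := by omega
              rw [hdd]
              exact ih r d (by omega) hd (by omega)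
          · simp only [h2, if_false]
            by_cases h3 : ch = ']'
            · simp only [h3, if_pos]
              by_cases hd1 : d = 1
              · have hz : d - 1 = 0 := by omega
                simp [hd1, hz]
              · have hz : ¬ (d - 1 = 0) := by omega
                simp [hd1, hz]
            · simp only [h3, if_false]
              exact ih (j + 1) d (by omega) hd (by omega)
    · simp [hlt]

-- ===== VERDICT (by name: the statement is the Claim_ definition above) =====
theorem skip_balanced_optional_brackets_py_spec : Claim_equal_skip_balanced_optional_brackets_py := by
  intro s i _ hpre
  unfold Pre_skip_balanced_optional_brackets_py at hpre
  unfold Spec_skip_balanced_optional_brackets_py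
  unfold skip_balanced_optional_brackets_py skip_balanced_optional_brackets_py_alt
  simp only [PySem.Str.len_eq, PySem.Str.pyGet?, PySem.Chars.pyGet?, String.length_toList] at hpre ⊢
  by_cases hge : (s.length : Int) ≤ i
  · simp [hge]
  · simp only [hge, if_false]
    cases hg : PySem.List.pyGet? s.toList i with
    | none => simp [hg]
    | some c =>
      simp only [hg]
      by_cases hc : c = '['
      · subst hc
        simp only [ne_eq, not_true_eq_false, if_false]
        -- unfold one step of A's loop at j = i: ch = '[' so depth becomes 1, j becomes i+1
        rw [pvLoopA]
        have hlt : i < (s.length : Int) := by omega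
        simp only [PySem.Str.len_eq, PySem.Str.pyGet?, PySem.Chars.pyGet?, String.length_toList,
          hlt, dif_pos, hg]
        have hne : ¬ ('[' = '\\' ∧ i + 1 < (s.length : Int)) := by
          intro h; exact absurd h.1 (by decide)
        rw [if_neg hne]
        rw [if_true]
        have hb := pvBridge s i (((s.length : Int) - i).toNat) (i + 1) 1
          (by omega) (by omega) (by omega)
        rw [zero_add, hb]
        cases pvGroupB s ((s.length : Int) - i).toNat (i + 1) <;> simp
      · simp [hc]
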